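-- pv_equiv track=rewrite | github.com/Andyporras/Recursion_cola | partirLista 13-4-2021.py | partirLista1_aux
-- ===== SOURCE A (Python) =====
-- def partirLista1_aux(lista,sublista,result):
--     if(lista==[]):
--         return result+[sublista]
--     elif(lista[0]>0):
--         suma=lista[0]
--         return partirLista1_aux(lista[1:],sublista+[suma],result)
--     else:
--         return partirLista1_aux(lista[1:],[],result+[sublista])
-- ===== SOURCE B (Python) =====
-- def partirLista1_aux(lista, sublista, result):
--     out = list(result)
--     cur = list(sublista)
--     for x in lista:
--         if x > 0:
--             cur.append(x)
--         else:
--             out.append(cur)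
--             cur = []
--     out.append(cur)
--     return out
-- ===== Notes on version B (the rewrite author's own statement) =====
-- stated objective: faster
-- what changed: Replaced the O(n^2) recursion that rebuilds lista[1:] and sublista+[x] at every step with a single iterative pass over lista that appends in place to a current run and flushes it on non-positive elements.
import Mathlib
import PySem

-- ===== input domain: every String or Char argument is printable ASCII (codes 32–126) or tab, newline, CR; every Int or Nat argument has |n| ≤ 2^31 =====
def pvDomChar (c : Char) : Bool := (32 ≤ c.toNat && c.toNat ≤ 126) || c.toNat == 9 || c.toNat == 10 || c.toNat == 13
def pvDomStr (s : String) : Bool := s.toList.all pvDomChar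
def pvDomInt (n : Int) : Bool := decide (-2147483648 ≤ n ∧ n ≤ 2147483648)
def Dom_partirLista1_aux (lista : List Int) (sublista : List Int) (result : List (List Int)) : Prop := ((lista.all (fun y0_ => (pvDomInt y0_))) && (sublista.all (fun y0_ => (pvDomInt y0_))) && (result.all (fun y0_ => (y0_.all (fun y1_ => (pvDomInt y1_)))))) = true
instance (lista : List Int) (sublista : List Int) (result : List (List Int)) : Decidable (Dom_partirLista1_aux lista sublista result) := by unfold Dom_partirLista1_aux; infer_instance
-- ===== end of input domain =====

-- B replaces A's quadratic recursion (lista[1:], sublista+[x] rebuilt each step) with one linear foldl pass; faster (asymptotic).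


-- ===== PORT A =====
def partirLista1_aux (lista : List Int) (sublista : List Int) (result : List (List Int)) : List (List Int) :=
  match lista with
  | [] => result ++ [sublista]
  | x :: rest =>
    if x > 0 then
      let suma := x
      partirLista1_aux rest (sublista ++ [suma]) result
    else
      partirLista1_aux rest [] (result ++ [sublista])

-- ===== PORT B =====
def partirLista1_aux_alt (lista : List Int) (sublista : List Int) (result : List (List Int)) : List (List Int) :=
  let s := lista.foldl
    (fun (st : List (List Int) × List Int) x =>
      if x > 0 then (st.1, st.2 ++ [x]) else (st.1 ++ [st.2], []))
    (result, sublista)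
  s.1 ++ [s.2]

-- ===== PRECONDITION & SPEC =====
def Spec_partirLista1_aux (lista : List Int) (sublista : List Int) (result : List (List Int)) (out : List (List Int)) : Prop := out = partirLista1_aux_alt lista sublista result
instance (lista : List Int) (sublista : List Int) (result : List (List Int)) (out : List (List Int)) : Decidable (Spec_partirLista1_aux lista sublista result out) := by unfold Spec_partirLista1_aux; infer_instance

-- ===== CLAIM (what is proved, stated in full; the proofs are below) =====
def Claim_equal_partirLista1_aux : Prop := ∀ (lista : List Int) (sublista : List Int) (result : List (List Int)), Dom_partirLista1_aux lista sublista result → Spec_partirLista1_aux lista sublista result (partirLista1_aux lista sublista result)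

-- ===== LEMMAS AND PROOFS =====
theorem partirLista1_aux_eq_alt (lista sublista : List Int) (result : List (List Int)) :
    partirLista1_aux lista sublista result = partirLista1_aux_alt lista sublista result := by
  induction lista generalizing sublista result with
  | nil => simp [partirLista1_aux, partirLista1_aux_alt]
  | cons x rest ih =>
    simp only [partirLista1_aux, partirLista1_aux_alt, List.foldl_cons]
    split_ifs with h <;> simp [ih, partirLista1_aux_alt]

-- ===== VERDICT (by name: the statement is the Claim_ definition above) =====
theorem partirLista1_aux_spec : Claim_equal_partirLista1_aux := by
  intro lista sublista result _
  exact partirLista1_aux_eq_alt lista sublista result
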